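-- pv_equiv track=rewrite | github.com/Avicii4/LeetCode | Python/exam/geek1.py | func
-- ===== SOURCE A (Python) =====
-- from collections import Counter
--
-- def func(s):
--     n = len(s)
--     dp = [Counter("") for _ in range(n + 1)] * (n + 1)
--     res = 0
--     for i in range(0, n - 2):
--         for j in range(i + 3, n + 1, 3):
--             cnt = Counter(s[i:j-3]) + Counter(s[j-3:j])
--             dp[i][j] = cnt
--             if cnt['r'] == cnt['e'] == cnt['d']:
--                 res += 1
--     return res
-- ===== SOURCE B (Python) =====
-- def func(s):
--     r = e = d = 0
--     pref = [(0, 0, 0)]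
--     for ch in s:
--         r += ch == 'r'
--         e += ch == 'e'
--         d += ch == 'd'
--         pref.append((r, e, d))
--     n = len(s)
--     res = 0
--     for i in range(0, n - 2):
--         ri, ei, di = pref[i]
--         for j in range(i + 3, n + 1, 3):
--             rj, ej, dj = pref[j]
--             if rj - ri == ej - ei and ej - ei == dj - di:
--                 res += 1
--     return res
-- ===== Notes on version B (the rewrite author's own statement) =====
-- stated objective: faster
-- what changed: B builds prefix counts of 'r'/'e'/'d' once and checks each (i,j) pair by subtracting two prefix triples in O(1), instead of A's rebuilding a Counter of the whole slice s[i:j] for every pair.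
import Mathlib
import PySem

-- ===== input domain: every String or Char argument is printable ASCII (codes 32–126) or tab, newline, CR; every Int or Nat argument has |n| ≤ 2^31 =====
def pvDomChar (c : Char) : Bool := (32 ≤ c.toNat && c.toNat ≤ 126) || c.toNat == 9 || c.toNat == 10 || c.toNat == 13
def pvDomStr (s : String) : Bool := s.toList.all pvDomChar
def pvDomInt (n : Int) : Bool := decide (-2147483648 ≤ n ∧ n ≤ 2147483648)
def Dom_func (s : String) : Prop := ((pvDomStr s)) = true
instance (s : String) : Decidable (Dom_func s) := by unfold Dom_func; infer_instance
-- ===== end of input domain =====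

-- B replaces A's per-pair Counter over a fresh slice (O(n) work per (i,j)) by prefix counts of
-- 'r'/'e'/'d' built once, making each pair check O(1): O(n^3) → O(n^2) (objective: faster).

-- ===== PORT A =====
-- dp is written but never read back; its writes cannot affect the result and are omitted.
-- cnt = Counter(s[i:j-3]) + Counter(s[j-3:j]); cnt[c] reads as the sum of the two counts
-- (Counter.__add__ drops non-positive entries, but a missing key reads as 0, so the read value
-- is exactly the sum of the two counts).
def func (s : String) : Int :=
  let xs := s.toList
  let n : Int := (xs.length : Int)
  (PySem.List.pyRange 0 (n - 2) 1).foldl (fun res i =>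
    (PySem.List.pyRange (i + 3) (n + 1) 3).foldl (fun res j =>
      let c1 := PySem.Dict.counter (PySem.List.slice xs (some i) (some (j - 3)))
      let c2 := PySem.Dict.counter (PySem.List.slice xs (some (j - 3)) (some j))
      let cr := c1.getD 'r' 0 + c2.getD 'r' 0
      let ce := c1.getD 'e' 0 + c2.getD 'e' 0
      let cd := c1.getD 'd' 0 + c2.getD 'd' 0
      if cr = ce ∧ ce = cd then res + 1 else res) res) 0

-- ===== PORT B =====
-- transliteration of Source B: one pass building pref = [(r,e,d) prefix counts], then the pair loop
-- with an O(1) lookup-and-subtract check.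
def func_alt (s : String) : Int :=
  let st := s.toList.foldl
    (fun (st : (Int × Int × Int) × List (Int × Int × Int)) ch =>
      let r := st.1.1 + (if ch = 'r' then 1 else 0)
      let e := st.1.2.1 + (if ch = 'e' then 1 else 0)
      let d := st.1.2.2 + (if ch = 'd' then 1 else 0)
      ((r, e, d), st.2 ++ [(r, e, d)]))
    (((0 : Int), (0 : Int), (0 : Int)), [((0 : Int), (0 : Int), (0 : Int))])
  let pref := st.2
  let n : Int := (s.toList.length : Int)
  (PySem.List.pyRange 0 (n - 2) 1).foldl (fun res i =>
    let pi := PySem.List.pyGetD pref i (0, 0, 0)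
    (PySem.List.pyRange (i + 3) (n + 1) 3).foldl (fun res j =>
      let pj := PySem.List.pyGetD pref j (0, 0, 0)
      if pj.1 - pi.1 = pj.2.1 - pi.2.1 ∧ pj.2.1 - pi.2.1 = pj.2.2 - pi.2.2 then res + 1
      else res) res) 0

-- ===== PRECONDITION & SPEC =====
def Spec_func (s : String) (out : Int) : Prop := out = func_alt s
instance (s : String) (out : Int) : Decidable (Spec_func s out) := by unfold Spec_func; infer_instance

-- ===== CLAIM (what is proved, stated in full; the proofs are below) =====
def Claim_equal_func : Prop := ∀ (s : String), Dom_func s → Spec_func s (func s)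

-- ===== LEMMAS AND PROOFS =====

/-- The triple of 'r'/'e'/'d' counts of a character list. -/
def pvCnts (l : List Char) : Int × Int × Int :=
  ((l.count 'r' : Int), (l.count 'e' : Int), (l.count 'd' : Int))

/-- The table of prefix count triples that Source B's first loop builds. -/
def pvPrefTable (l : List Char) : List (Int × Int × Int) :=
  (List.range (l.length + 1)).map (fun k => pvCnts (l.take k))

theorem pvCnts_append_singleton (l : List Char) (x : Char) :
    pvCnts (l ++ [x]) =
      ((pvCnts l).1 + (if x = 'r' then 1 else 0),
       (pvCnts l).2.1 + (if x = 'e' then 1 else 0),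
       (pvCnts l).2.2 + (if x = 'd' then 1 else 0)) := by
  simp only [pvCnts, List.count_append, List.count_singleton, Prod.mk.injEq, beq_iff_eq]
  refine ⟨?_, ?_, ?_⟩ <;> (split_ifs with h <;> subst_eqs <;> push_cast <;> omega)

theorem pvPrefTable_append_singleton (l : List Char) (x : Char) :
    pvPrefTable (l ++ [x]) = pvPrefTable l ++ [pvCnts (l ++ [x])] := by
  unfold pvPrefTable
  rw [List.length_append, List.length_singleton,
    show l.length + 1 + 1 = (l.length + 1) + 1 from rfl, List.range_succ, List.map_append]
  congr 1
  · exact List.map_congr_left (fun k hk => by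
      rw [List.take_append_of_le_length (by simpa using Nat.lt_succ_iff.mp (List.mem_range.mp hk))])
  · simp [List.take_of_length_le]

/-- The building loop of Source B produces exactly the prefix table. -/
theorem pvBuild (xs : List Char) : ∀ (pre : List Char),
    xs.foldl
      (fun (st : (Int × Int × Int) × List (Int × Int × Int)) ch =>
        let r := st.1.1 + (if ch = 'r' then 1 else 0)
        let e := st.1.2.1 + (if ch = 'e' then 1 else 0)
        let d := st.1.2.2 + (if ch = 'd' then 1 else 0)
        ((r, e, d), st.2 ++ [(r, e, d)]))
      (pvCnts pre, pvPrefTable pre)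
    = (pvCnts (pre ++ xs), pvPrefTable (pre ++ xs)) := by
  induction xs with
  | nil => intro pre; simp
  | cons x xs ih =>
    intro pre
    rw [List.foldl_cons]
    have hstep :
        (let r := (pvCnts pre).1 + (if x = 'r' then 1 else 0)
         let e := (pvCnts pre).2.1 + (if x = 'e' then 1 else 0)
         let d := (pvCnts pre).2.2 + (if x = 'd' then 1 else 0)
         ((r, e, d), pvPrefTable pre ++ [(r, e, d)]))
        = (pvCnts (pre ++ [x]), pvPrefTable (pre ++ [x])) := by
      rw [pvPrefTable_append_singleton, pvCnts_append_singleton]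
    rw [hstep, ih (pre ++ [x])]
    simp

theorem pvPrefTable_get (l : List Char) (k : Int) (h0 : 0 ≤ k) (h1 : k ≤ (l.length : Int)) :
    PySem.List.pyGetD (pvPrefTable l) k (0, 0, 0) = pvCnts (l.take k.toNat) := by
  rw [PySem.List.pyGetD_eq_getElem _ _ h0 (by simp [pvPrefTable]; omega)]
  have hk : k.toNat < l.length + 1 := by omega
  simp [pvPrefTable]

theorem pvCount_take_split (l : List Char) (c : Char) (a b : Nat) (h : a ≤ b) :
    (l.take b).count c = (l.take a).count c + ((l.drop a).take (b - a)).count c := by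
  conv_lhs => rw [show b = a + (b - a) by omega, List.take_add]
  rw [List.count_append]

/-- cnt[c] in A's inner body, expressed through prefix counts. -/
theorem pvSliceCnt (xs : List Char) (c : Char) (i j : Int) (h0 : 0 ≤ i) (h3 : i + 3 ≤ j) :
    ((PySem.List.slice xs (some i) (some (j - 3))).count c : Int)
      + ((PySem.List.slice xs (some (j - 3)) (some j)).count c : Int)
      = ((xs.take j.toNat).count c : Int) - ((xs.take i.toNat).count c : Int) := by
  rw [PySem.List.slice_toNat xs h0 (by omega), PySem.List.slice_toNat xs (by omega) (by omega)]
  have h1 : i.toNat ≤ (j - 3).toNat := by omega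
  have h2 : (j - 3).toNat ≤ j.toNat := by omega
  have e1 := pvCount_take_split xs c i.toNat (j - 3).toNat h1
  have e2 := pvCount_take_split xs c (j - 3).toNat j.toNat h2
  push_cast [e2, e1]
  omega

theorem func_eq_alt (s : String) : func s = func_alt s := by
  have hb := pvBuild s.toList []
  rw [show ((pvCnts [], pvPrefTable []) : (Int × Int × Int) × List (Int × Int × Int))
        = (((0 : Int), (0 : Int), (0 : Int)), [((0 : Int), (0 : Int), (0 : Int))]) from rfl,
     List.nil_append] at hb
  simp only [func, func_alt, hb]
  refine PySem.List.foldl_congr_mem _ _ _ _ (fun res i hi => ?_)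
  obtain ⟨hi0, hi1⟩ := PySem.List.mem_pyRange_one.mp hi
  refine PySem.List.foldl_congr_mem _ _ _ _ (fun res j hj => ?_)
  obtain ⟨hj0, hj1, -⟩ := (PySem.List.mem_pyRange_iff_of_pos (by norm_num) j).mp hj
  have hij : i + 3 ≤ j := hj0
  have hjn : j ≤ (s.toList.length : Int) := by omega
  simp only [PySem.Dict.getD_counter]
  rw [pvPrefTable_get _ i hi0 (by omega), pvPrefTable_get _ j (by omega) hjn]
  rw [pvSliceCnt s.toList 'r' i j hi0 hij, pvSliceCnt s.toList 'e' i j hi0 hij,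
      pvSliceCnt s.toList 'd' i j hi0 hij]
  simp [pvCnts]

-- ===== VERDICT (by name: the statement is the Claim_ definition above) =====
theorem func_spec : Claim_equal_func := by
  intro s _
  unfold Spec_func
  exact func_eq_alt s
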